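-- pv_equiv track=rewrite | github.com/Lurenming/PythonSTG | src/ui/dialog_gl_renderer.py | _apply_visible_text
-- ===== SOURCE A (Python) =====
-- def _apply_visible_text(visible_text: str, line_lengths: list) -> list:
--     """Map visible text onto precomputed line lengths."""
--     lines = []
--     remaining = visible_text
--     for length in line_lengths:
--         if length <= 0:
--             lines.append("")
--             continue
--         lines.append(remaining[:length])
--         remaining = remaining[length:]
--     return lines
-- ===== SOURCE B (Python) =====
-- def _apply_visible_text(visible_text: str, line_lengths: list) -> list:
--     """Map visible text onto precomputed line lengths."""
--     starts = []
--     offset = 0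
--     for length in line_lengths:
--         starts.append(offset)
--         if length > 0:
--             offset += length
--     return ["" if length <= 0 else visible_text[start:start + length]
--             for length, start in zip(line_lengths, starts)]
-- ===== Notes on version B (the rewrite author's own statement) =====
-- stated objective: alternative
-- what changed: B is two staged passes instead of A's single stateful loop over a shrinking tail: a first pass computes each line's starting offset into the original string, then a comprehension over zip(line_lengths, starts) slices every line directly out of the original text, avoiding the repeated copying of the remaining tail.
import Mathlib
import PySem

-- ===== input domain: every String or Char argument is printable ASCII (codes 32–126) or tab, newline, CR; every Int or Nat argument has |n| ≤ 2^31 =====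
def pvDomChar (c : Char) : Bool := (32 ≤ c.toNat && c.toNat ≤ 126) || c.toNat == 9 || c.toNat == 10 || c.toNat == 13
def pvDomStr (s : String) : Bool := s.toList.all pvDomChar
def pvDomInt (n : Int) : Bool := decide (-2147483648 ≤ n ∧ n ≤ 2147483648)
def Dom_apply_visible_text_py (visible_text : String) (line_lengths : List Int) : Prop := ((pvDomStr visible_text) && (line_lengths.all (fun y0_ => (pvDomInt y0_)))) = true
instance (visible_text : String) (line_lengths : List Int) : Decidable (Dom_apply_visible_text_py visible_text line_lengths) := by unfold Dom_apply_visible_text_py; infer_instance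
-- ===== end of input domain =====

-- B replaces A's single stateful loop over a shrinking tail by two staged passes:
-- first compute each line's start offset, then slice every line out of the
-- original string via zip+map (objective: alternative).

-- ===== PORT A =====
-- loop over line_lengths carrying (lines, remaining), as A does
def pvALoop (line_lengths : List Int) (lines : List String) (remaining : List Char) : List String :=
  match line_lengths with
  | [] => lines
  | length :: rest =>
    if length ≤ 0 then pvALoop rest (lines ++ [""]) remaining
    else pvALoop rest (lines ++ [String.ofList (PySem.List.slice remaining none (some length))])
                      (PySem.List.slice remaining (some length) none)

def apply_visible_text_py (visible_text : String) (line_lengths : List Int) : List String :=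
  pvALoop line_lengths [] visible_text.toList

-- ===== PORT B =====
-- first pass of B: the list of start offsets, one per length
def pvBStarts (line_lengths : List Int) (offset : Int) : List Int :=
  match line_lengths with
  | [] => []
  | length :: rest => offset :: pvBStarts rest (if 0 < length then offset + length else offset)

-- second pass of B: the comprehension over zip(line_lengths, starts)
def apply_visible_text_py_alt (visible_text : String) (line_lengths : List Int) : List String :=
  (line_lengths.zip (pvBStarts line_lengths 0)).map (fun p =>
    if p.1 ≤ 0 then ""
    else String.ofList (PySem.List.slice visible_text.toList (some p.2) (some (p.2 + p.1))))

-- ===== PRECONDITION & SPEC =====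
def Spec_apply_visible_text_py (visible_text : String) (line_lengths : List Int) (out : List String) : Prop := out = apply_visible_text_py_alt visible_text line_lengths
instance (visible_text : String) (line_lengths : List Int) (out : List String) : Decidable (Spec_apply_visible_text_py visible_text line_lengths out) := by unfold Spec_apply_visible_text_py; infer_instance

-- ===== CLAIM (what is proved, stated in full; the proofs are below) =====
def Claim_equal_apply_visible_text_py : Prop := ∀ (visible_text : String) (line_lengths : List Int), Dom_apply_visible_text_py visible_text line_lengths → Spec_apply_visible_text_py visible_text line_lengths (apply_visible_text_py visible_text line_lengths)

-- ===== LEMMAS AND PROOFS =====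

-- invariant: A's loop from tail `text.drop off` produces `lines ++` B's zip-map from offset off
theorem pvLoop_eq (text : List Char) (ls : List Int) :
    ∀ (off : Int) (lines : List String), 0 ≤ off →
      pvALoop ls lines (text.drop off.toNat) =
        lines ++ (ls.zip (pvBStarts ls off)).map (fun p =>
          if p.1 ≤ 0 then ""
          else String.ofList (PySem.List.slice text (some p.2) (some (p.2 + p.1)))) := by
  induction ls with
  | nil => intro off lines _; simp [pvALoop, pvBStarts]
  | cons length rest ih =>
    intro off lines hoff
    by_cases h : length ≤ 0
    · have hlt : ¬ (0 < length) := by omega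
      simp only [pvALoop, pvBStarts, if_pos h, hlt, List.zip_cons_cons,
        List.map_cons]
      rw [ih off _ hoff]
      simp
    · rw [not_le] at h
      have hsum : (0:Int) ≤ off + length := by omega
      have hslice1 : PySem.List.slice (text.drop off.toNat) none (some length)
          = PySem.List.slice text (some off) (some (off + length)) := by
        rw [PySem.List.slice_to, PySem.List.slice_toNat]
        · congr 1; omega
        all_goals omega
      have hslice2 : PySem.List.slice (text.drop off.toNat) (some length) none
          = text.drop (off + length).toNat := by
        rw [PySem.List.slice_from, List.drop_drop]
        · congr 1; omega
        all_goals omega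
      simp only [pvALoop, pvBStarts, if_neg (not_le.mpr h), if_pos h, hslice1, hslice2,
        List.zip_cons_cons, List.map_cons]
      rw [ih (off + length) _ hsum]
      simp

-- ===== VERDICT (by name: the statement is the Claim_ definition above) =====
theorem apply_visible_text_py_spec : Claim_equal_apply_visible_text_py := by
  intro visible_text line_lengths _
  unfold Spec_apply_visible_text_py apply_visible_text_py apply_visible_text_py_alt
  simpa using pvLoop_eq visible_text.toList line_lengths 0 [] le_rfl
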